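-- pv_equiv track=rewrite | github.com/diankong720-ui/Data-Pandora | scripts/example_sql_boundary_test.py | _choose_date_column
-- ===== SOURCE A (Python) =====
-- DATE_COLUMN_CANDIDATES = (
--     "event_time",
--     "create_time",
--     "created_at",
--     "update_time",
--     "updated_at",
--     "pay_time",
--     "date",
--     "dt",
--     "day",
-- )
--
-- def _looks_date_column(column: dict[str, str]) -> bool:
--     name = column["name"].lower()
--     dtype = column.get("type", "").lower()
--     return name in DATE_COLUMN_CANDIDATES or "date" in dtype or "time" in dtype
--
-- def _choose_date_column(columns: list[dict[str, str]]) -> str | None: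
--     for candidate in DATE_COLUMN_CANDIDATES:
--         for column in columns:
--             if column["name"].lower() == candidate:
--                 return column["name"]
--     for column in columns:
--         if _looks_date_column(column):
--             return column["name"]
--     return None
-- ===== SOURCE B (Python) =====
-- DATE_COLUMN_CANDIDATES = (
--     "event_time",
--     "create_time",
--     "created_at",
--     "update_time",
--     "updated_at",
--     "pay_time",
--     "date",
--     "dt",
--     "day",
-- )
--
-- def _choose_date_column(columns):
--     # single pass: track the column with the best (lowest) priority rank seen so far;
--     # rank = index in DATE_COLUMN_CANDIDATES, or len(candidates) for a date/time-typed
--     # column, or None for a non-date column; first column wins on equal rank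
--     best_rank = None
--     best_name = None
--     for column in columns:
--         name = column["name"]
--         try:
--             rank = DATE_COLUMN_CANDIDATES.index(name.lower())
--         except ValueError:
--             dtype = column.get("type", "").lower()
--             rank = len(DATE_COLUMN_CANDIDATES) if ("date" in dtype or "time" in dtype) else None
--         if rank is not None and (best_rank is None or rank < best_rank):
--             best_rank = rank
--             best_name = name
--     return best_name
-- ===== Notes on version B (the rewrite author's own statement) =====
-- stated objective: alternative
-- what changed: Replaces A's candidate-by-candidate rescans of the column list (plus a separate fallback pass) by ONE left-to-right pass that assigns each column a priority rank (index in DATE_COLUMN_CANDIDATES, len(candidates) for date/time-typed columns, None otherwise) and keeps the first column with the minimal rank.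
-- outside the precondition, e.g. on _choose_date_column([{'name': 'event_time'}, {}]): A returns 'event_time', B raises KeyError
import Mathlib
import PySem

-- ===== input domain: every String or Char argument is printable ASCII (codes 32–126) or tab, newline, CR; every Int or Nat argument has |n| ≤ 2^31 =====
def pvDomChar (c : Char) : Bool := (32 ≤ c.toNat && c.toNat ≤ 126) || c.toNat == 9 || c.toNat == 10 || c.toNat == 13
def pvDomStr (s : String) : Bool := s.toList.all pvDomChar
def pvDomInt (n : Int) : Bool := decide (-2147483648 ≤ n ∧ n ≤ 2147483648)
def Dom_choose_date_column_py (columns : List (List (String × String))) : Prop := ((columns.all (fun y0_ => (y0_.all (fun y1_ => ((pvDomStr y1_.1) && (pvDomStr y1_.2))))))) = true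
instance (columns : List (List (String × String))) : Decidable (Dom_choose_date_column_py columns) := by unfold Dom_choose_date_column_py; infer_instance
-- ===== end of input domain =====

-- B replaces A's per-candidate rescans by a single pass keeping the first column of
-- minimal priority rank (alternative decomposition; return-value equivalence only).

-- ===== PORT A =====
-- column["name"] (KeyError excluded by Pre_, "" is a placeholder never equal to a
-- candidate) and column.get("type", "")
def pvGetName (col : List (String × String)) : String :=
  ((col.find? (fun p => p.1 == "name")).map (·.2)).getD ""
def pvGetType (col : List (String × String)) : String :=
  ((col.find? (fun p => p.1 == "type")).map (·.2)).getD ""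
def pvCands : List String :=
  ["event_time", "create_time", "created_at", "update_time", "updated_at",
   "pay_time", "date", "dt", "day"]
def pvLooks (col : List (String × String)) : Bool :=
  let name := PySem.Str.lower (pvGetName col)
  let dtype := PySem.Str.lower (pvGetType col)
  pvCands.contains name || PySem.Str.isIn "date" dtype || PySem.Str.isIn "time" dtype

def choose_date_column_py (columns : List (List (String × String))) : Option String :=
  match pvCands.findSome? (fun cand =>
      (columns.find? (fun col => PySem.Str.lower (pvGetName col) == cand)).map pvGetName) with
  | some n => some n
  | none =>
    match columns.find? pvLooks with
    | some col => some (pvGetName col)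
    | none => none

-- ===== PORT B =====
-- rank of one column: DATE_COLUMN_CANDIDATES.index(name.lower()) via try/except,
-- falling back to len(DATE_COLUMN_CANDIDATES) for a date/time-typed column
def pvRank (col : List (String × String)) : Option Nat :=
  match PySem.List.index? pvCands (PySem.Str.lower (pvGetName col)) with
  | some i => some i
  | none =>
    let dtype := PySem.Str.lower (pvGetType col)
    if PySem.Str.isIn "date" dtype || PySem.Str.isIn "time" dtype then some pvCands.length
    else none

-- loop body: keep (best_rank, best_name) unless the new rank is smaller
def pvStep (acc : Option Nat × Option String) (col : List (String × String)) :
    Option Nat × Option String :=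
  match pvRank col, acc.1 with
  | none, _ => acc
  | some k, none => (some k, some (pvGetName col))
  | some k, some r => if k < r then (some k, some (pvGetName col)) else acc

def choose_date_column_py_alt (columns : List (List (String × String))) : Option String :=
  (columns.foldl pvStep (none, none)).2

-- ===== PRECONDITION & SPEC =====
-- Pre_ excludes column lists in which some column lacks a "name" key: Python A raises
-- KeyError there (except when an earlier column is literally named "event_time", where A
-- returns before reaching the bad column), and Python B raises KeyError on all of them.
def Pre_choose_date_column_py (columns : List (List (String × String))) : Prop :=
  (columns.all (fun col => col.any (fun p => p.1 == "name"))) = true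
instance (columns : List (List (String × String))) : Decidable (Pre_choose_date_column_py columns) := by unfold Pre_choose_date_column_py; infer_instance
def pvWitness_choose_date_column_py : (List (List (String × String))) :=
  [[("name", "id"), ("type", "int")], [("name", "Create_Time"), ("type", "datetime")]]
def Spec_choose_date_column_py (columns : List (List (String × String))) (out : Option String) : Prop := out = choose_date_column_py_alt columns
instance (columns : List (List (String × String))) (out : Option String) : Decidable (Spec_choose_date_column_py columns out) := by unfold Spec_choose_date_column_py; infer_instance

-- ===== CLAIM (what is proved, stated in full; the proofs are below) =====
def Claim_equal_choose_date_column_py : Prop := ∀ (columns : List (List (String × String))), Dom_choose_date_column_py columns → Pre_choose_date_column_py columns → Spec_choose_date_column_py columns (choose_date_column_py columns)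

-- ===== LEMMAS AND PROOFS =====

-- proof-side view of B: the lexicographically first (rank, name) pair, head-wins on ties
def pvMerge : Option (Nat × String) → Option (Nat × String) → Option (Nat × String)
  | none, x => x
  | some a, none => some a
  | some (r, m), some (k, n) => if k < r then some (k, n) else some (r, m)

def pvBest : List (List (String × String)) → Option (Nat × String)
  | [] => none
  | c :: cs =>
    pvMerge (match pvRank c with | none => none | some k => some (k, pvGetName c)) (pvBest cs)

def pvUnpack : Option (Nat × String) → Option Nat × Option String
  | none => (none, none)
  | some (r, m) => (some r, some m)

-- proof-side view of A: the first column whose rank is exactly i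
def pvF (cols : List (List (String × String))) (i : Nat) : Option (List (String × String)) :=
  cols.find? (fun c => pvRank c == some i)

theorem pv_merge_assoc (a b c : Option (Nat × String)) :
    pvMerge (pvMerge a b) c = pvMerge a (pvMerge b c) := by
  rcases a with _ | ⟨r1, m1⟩ <;> rcases b with _ | ⟨r2, m2⟩ <;> rcases c with _ | ⟨r3, m3⟩ <;>
    simp only [pvMerge] <;> split_ifs <;> simp only [pvMerge] <;> split_ifs <;>
    first | rfl | omega

theorem pv_fold_eq_best (cols : List (List (String × String))) (b : Option (Nat × String)) :
    cols.foldl pvStep (pvUnpack b) = pvUnpack (pvMerge b (pvBest cols)) := by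
  induction cols generalizing b with
  | nil => cases b with | none => rfl | some a => cases a; rfl
  | cons c cs ih =>
    have hstep : pvStep (pvUnpack b) c
        = pvUnpack (pvMerge b (match pvRank c with | none => none | some k => some (k, pvGetName c))) := by
      rcases b with _ | ⟨r, m⟩ <;> simp only [pvStep, pvUnpack, pvMerge] <;>
        rcases h : pvRank c with _ | k <;> simp [pvUnpack, pvMerge] <;> split_ifs <;> simp [pvUnpack]
    simp only [List.foldl_cons, hstep, ih, pvBest, pv_merge_assoc]

theorem pv_rank_eq_some_iff (col : List (String × String)) (i : Nat) (hi : i < pvCands.length) :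
    pvRank col = some i ↔ PySem.Str.lower (pvGetName col) = pvCands[i] := by
  unfold pvRank
  cases h : PySem.List.index? pvCands (PySem.Str.lower (pvGetName col)) with
  | some j =>
    obtain ⟨hj, heq, hmin⟩ := PySem.List.getElem_of_index?_eq_some h
    simp only [Option.some.injEq]
    constructor
    · rintro rfl; exact heq.symm
    · intro hlow
      have hnd : pvCands.Nodup := by decide
      exact hnd.getElem_inj_iff.mp (heq.trans hlow)
  | none =>
    have hnm : PySem.Str.lower (pvGetName col) ∉ pvCands :=
      (PySem.List.index?_eq_none_iff _ _).mp h
    constructor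
    · intro hr
      have hr' : (if (PySem.Str.isIn "date" (PySem.Str.lower (pvGetType col))
            || PySem.Str.isIn "time" (PySem.Str.lower (pvGetType col))) = true
          then some pvCands.length else none) = some i := hr
      split_ifs at hr' with hb
      simp only [Option.some.injEq] at hr'; omega
    · intro hlow
      exact absurd (hlow ▸ List.getElem_mem hi) hnm

theorem pv_rank_isSome (col : List (String × String)) :
    (pvRank col).isSome = pvLooks col := by
  unfold pvRank pvLooks
  cases h : PySem.List.index? pvCands (PySem.Str.lower (pvGetName col)) with
  | some j =>
    have hm : PySem.Str.lower (pvGetName col) ∈ pvCands :=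
      (PySem.List.index?_isSome_iff pvCands (PySem.Str.lower (pvGetName col))).mp (by rw [h]; rfl)
    simp [List.contains_iff_mem, hm]
  | none =>
    have hnm : PySem.Str.lower (pvGetName col) ∉ pvCands :=
      (PySem.List.index?_eq_none_iff _ _).mp h
    cases hd : PySem.Chars.isIn ['d', 'a', 't', 'e'] (PySem.Chars.lower (pvGetType col).toList) <;>
      cases ht : PySem.Chars.isIn ['t', 'i', 'm', 'e'] (PySem.Chars.lower (pvGetType col).toList) <;>
      simp [List.contains_iff_mem, hnm, hd, ht]

theorem pv_rank_le (col : List (String × String)) (k : Nat) (h : pvRank col = some k) :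
    k ≤ pvCands.length := by
  unfold pvRank at h
  cases hx : PySem.List.index? pvCands (PySem.Str.lower (pvGetName col)) with
  | some j =>
    rw [hx] at h
    simp only [Option.some.injEq] at h
    obtain ⟨hj, -, -⟩ := PySem.List.getElem_of_index?_eq_some hx
    omega
  | none =>
    rw [hx] at h
    have h' : (if (PySem.Str.isIn "date" (PySem.Str.lower (pvGetType col))
          || PySem.Str.isIn "time" (PySem.Str.lower (pvGetType col))) = true
        then some pvCands.length else none) = some k := h
    split_ifs at h' with hb
    simp only [Option.some.injEq] at h'; omega

theorem pvF_cons (c : List (String × String)) (cs : List (List (String × String))) (i : Nat) :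
    pvF (c :: cs) i = if pvRank c == some i then some c else pvF cs i := by
  unfold pvF
  cases hp : (pvRank c == some i) <;> simp [List.find?_cons, hp]

theorem pv_best_none (cols : List (List (String × String))) :
    pvBest cols = none → ∀ i, pvF cols i = none := by
  induction cols with
  | nil => intro _ i; rfl
  | cons c cs ih =>
    intro h i
    unfold pvBest at h
    cases hr : pvRank c with
    | some k =>
      rw [hr] at h
      cases hb : pvBest cs with
      | none => rw [hb] at h; exact absurd h (by simp [pvMerge])
      | some p =>
        obtain ⟨r2, m2⟩ := p
        rw [hb] at h
        simp only [pvMerge] at h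
        split_ifs at h
    | none =>
      rw [hr] at h
      have hb : pvBest cs = none := h
      rw [pvF_cons, hr]
      simpa using ih hb i

theorem pv_best_some (cols : List (List (String × String))) (r : Nat) (m : String)
    (h : pvBest cols = some (r, m)) :
    r ≤ pvCands.length ∧ (pvF cols r).map pvGetName = some m ∧ ∀ i, i < r → pvF cols i = none := by
  induction cols generalizing r m with
  | nil => exact absurd h (by simp [pvBest])
  | cons c cs ih =>
    unfold pvBest at h
    cases hr : pvRank c with
    | none =>
      rw [hr] at h
      have hb : pvBest cs = some (r, m) := h
      obtain ⟨h1, h2, h3⟩ := ih r m hb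
      refine ⟨h1, ?_, ?_⟩
      · rw [pvF_cons, hr]; simpa using h2
      · intro i hi; rw [pvF_cons, hr]; simpa using h3 i hi
    | some k =>
      rw [hr] at h
      cases hb : pvBest cs with
      | none =>
        rw [hb] at h
        have hkm : k = r ∧ pvGetName c = m := by
          simpa [pvMerge] using h
        obtain ⟨rfl, rfl⟩ := hkm
        refine ⟨pv_rank_le c k hr, ?_, ?_⟩
        · rw [pvF_cons, hr]; simp
        · intro i hi
          rw [pvF_cons, hr]
          have : (some k == some i) = false := by simp; omega
          rw [this]
          simp [pv_best_none cs hb i]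
      | some p =>
        obtain ⟨r2, m2⟩ := p
        rw [hb] at h
        obtain ⟨h1, h2, h3⟩ := ih r2 m2 hb
        simp only [pvMerge] at h
        split_ifs at h with hlt
        · -- keep (r2, m2)
          obtain ⟨rfl, rfl⟩ : r2 = r ∧ m2 = m := by simpa using h
          refine ⟨h1, ?_, ?_⟩
          · rw [pvF_cons, hr]
            have : (some k == some r2) = false := by simp; omega
            rw [this]; simpa using h2
          · intro i hi
            rw [pvF_cons, hr]
            have : (some k == some i) = false := by simp; omega
            rw [this]; simpa using h3 i hi
        · -- keep (k, pvGetName c)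
          obtain ⟨rfl, rfl⟩ : k = r ∧ pvGetName c = m := by simpa using h
          refine ⟨pv_rank_le c k hr, ?_, ?_⟩
          · rw [pvF_cons, hr]; simp
          · intro i hi
            rw [pvF_cons, hr]
            have hne : (some k == some i) = false := by simp; omega
            rw [hne]
            have : i < r2 := by omega
            simpa using h3 i this

theorem pv_slots (columns : List (List (String × String))) (i : Nat) (hi : i < pvCands.length)
    (s : String) (hs : pvCands[i] = s) :
    columns.find? (fun col => PySem.Str.lower (pvGetName col) == s) = pvF columns i := by
  subst hs
  unfold pvF
  congr 1
  funext col
  by_cases hcase : PySem.Str.lower (pvGetName col) = pvCands[i]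
  · simp [hcase, (pv_rank_eq_some_iff col i hi).mpr hcase]
  · have hne : pvRank col ≠ some i := fun hc => hcase ((pv_rank_eq_some_iff col i hi).mp hc)
    simp [hcase, hne]

theorem pv_phase1_none (columns : List (List (String × String)))
    (hn : ∀ i, i < 9 → pvF columns i = none) :
    pvCands.findSome? (fun cand =>
      (columns.find? (fun col => PySem.Str.lower (pvGetName col) == cand)).map pvGetName) = none := by
  have e0 := pv_slots columns 0 (by decide) "event_time" rfl
  have e1 := pv_slots columns 1 (by decide) "create_time" rfl
  have e2 := pv_slots columns 2 (by decide) "created_at" rfl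
  have e3 := pv_slots columns 3 (by decide) "update_time" rfl
  have e4 := pv_slots columns 4 (by decide) "updated_at" rfl
  have e5 := pv_slots columns 5 (by decide) "pay_time" rfl
  have e6 := pv_slots columns 6 (by decide) "date" rfl
  have e7 := pv_slots columns 7 (by decide) "dt" rfl
  have e8 := pv_slots columns 8 (by decide) "day" rfl
  simp only [pvCands, List.findSome?_cons, List.findSome?_nil]
  rw [e0, e1, e2, e3, e4, e5, e6, e7, e8]
  simp [hn 0 (by omega), hn 1 (by omega), hn 2 (by omega), hn 3 (by omega), hn 4 (by omega),
    hn 5 (by omega), hn 6 (by omega), hn 7 (by omega), hn 8 (by omega)]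

theorem pv_phase1_some (columns : List (List (String × String))) (r : Nat) (hr : r < 9)
    (m : String) (hm : (pvF columns r).map pvGetName = some m)
    (hn : ∀ i, i < r → pvF columns i = none) :
    pvCands.findSome? (fun cand =>
      (columns.find? (fun col => PySem.Str.lower (pvGetName col) == cand)).map pvGetName) = some m := by
  have e0 := pv_slots columns 0 (by decide) "event_time" rfl
  have e1 := pv_slots columns 1 (by decide) "create_time" rfl
  have e2 := pv_slots columns 2 (by decide) "created_at" rfl
  have e3 := pv_slots columns 3 (by decide) "update_time" rfl
  have e4 := pv_slots columns 4 (by decide) "updated_at" rfl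
  have e5 := pv_slots columns 5 (by decide) "pay_time" rfl
  have e6 := pv_slots columns 6 (by decide) "date" rfl
  have e7 := pv_slots columns 7 (by decide) "dt" rfl
  have e8 := pv_slots columns 8 (by decide) "day" rfl
  simp only [pvCands, List.findSome?_cons, List.findSome?_nil]
  rw [e0, e1, e2, e3, e4, e5, e6, e7, e8]
  interval_cases r
  · simp [hm]
  · rw [hn 0 (by omega)]; simp [hm]
  · rw [hn 0 (by omega)]; rw [hn 1 (by omega)]; simp [hm]
  · rw [hn 0 (by omega)]; rw [hn 1 (by omega)]; rw [hn 2 (by omega)]; simp [hm]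
  · rw [hn 0 (by omega)]; rw [hn 1 (by omega)]; rw [hn 2 (by omega)]; rw [hn 3 (by omega)]; simp [hm]
  · rw [hn 0 (by omega)]; rw [hn 1 (by omega)]; rw [hn 2 (by omega)]; rw [hn 3 (by omega)]; rw [hn 4 (by omega)]; simp [hm]
  · rw [hn 0 (by omega)]; rw [hn 1 (by omega)]; rw [hn 2 (by omega)]; rw [hn 3 (by omega)]; rw [hn 4 (by omega)]; rw [hn 5 (by omega)]; simp [hm]
  · rw [hn 0 (by omega)]; rw [hn 1 (by omega)]; rw [hn 2 (by omega)]; rw [hn 3 (by omega)]; rw [hn 4 (by omega)]; rw [hn 5 (by omega)]; rw [hn 6 (by omega)]; simp [hm]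
  · rw [hn 0 (by omega)]; rw [hn 1 (by omega)]; rw [hn 2 (by omega)]; rw [hn 3 (by omega)]; rw [hn 4 (by omega)]; rw [hn 5 (by omega)]; rw [hn 6 (by omega)]; rw [hn 7 (by omega)]; simp [hm]

theorem pv_fallback (columns : List (List (String × String)))
    (hn : ∀ i, i < 9 → pvF columns i = none) :
    columns.find? pvLooks = pvF columns 9 := by
  induction columns with
  | nil => rfl
  | cons c cs ih =>
    have hp : ∀ i, i < 9 → (pvRank c == some i) = false := by
      intro i hi
      have h := hn i hi
      rw [pvF_cons] at h
      by_contra hcon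
      have hb : (pvRank c == some i) = true := by simpa using hcon
      rw [hb] at h
      simp at h
    have hcs : ∀ i, i < 9 → pvF cs i = none := by
      intro i hi
      have h := hn i hi
      rw [pvF_cons, hp i hi] at h
      simpa using h
    have hl : pvLooks c = (pvRank c == some 9) := by
      rw [← pv_rank_isSome]
      cases hk : pvRank c with
      | none => rfl
      | some k =>
        have hlen : pvCands.length = 9 := rfl
        have hle := pv_rank_le c k hk
        have hk9 : k = 9 := by
          rcases Nat.lt_or_ge k 9 with hlt | hge
          · have h9 := hp k hlt
            rw [hk] at h9
            simp at h9
          · omega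
        subst hk9
        simp
    rw [pvF_cons, ← hl]
    cases hb : pvLooks c with
    | true => simp [hb]
    | false => simp [hb]; exact ih hcs

theorem choose_date_column_py_eq_alt (columns : List (List (String × String))) :
    choose_date_column_py columns = choose_date_column_py_alt columns := by
  have hB : choose_date_column_py_alt columns = (pvUnpack (pvBest columns)).2 := by
    unfold choose_date_column_py_alt
    rw [show ((none, none) : Option Nat × Option String) = pvUnpack none from rfl,
      pv_fold_eq_best]
    rfl
  rw [hB]
  unfold choose_date_column_py
  cases hbest : pvBest columns with
  | none =>
    have hn : ∀ i, i < 9 → pvF columns i = none := fun i _ => pv_best_none columns hbest i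
    rw [pv_phase1_none columns hn]
    have hfb : columns.find? pvLooks = none := by
      rw [pv_fallback columns hn]
      exact pv_best_none columns hbest 9
    rw [hfb]
    rfl
  | some p =>
    obtain ⟨r, m⟩ := p
    obtain ⟨hr9, hm, hlt⟩ := pv_best_some columns r m hbest
    have hlen : pvCands.length = 9 := rfl
    rcases Nat.lt_or_ge r 9 with hlt9 | hge
    · rw [pv_phase1_some columns r hlt9 m hm hlt]
      rfl
    · have hr : r = 9 := by omega
      subst hr
      have hn : ∀ i, i < 9 → pvF columns i = none := fun i hi => hlt i hi
      rw [pv_phase1_none columns hn, pv_fallback columns hn]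
      cases hF : pvF columns 9 with
      | none => rw [hF] at hm; simp at hm
      | some col =>
        rw [hF] at hm
        simp only [Option.map_some, Option.some.injEq] at hm
        simp [hm, pvUnpack]

-- ===== VERDICT (by name: the statement is the Claim_ definition above) =====
theorem choose_date_column_py_spec : Claim_equal_choose_date_column_py := by
  intro columns _ _
  unfold Spec_choose_date_column_py
  exact choose_date_column_py_eq_alt columns
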